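-- pv_equiv track=rewrite | github.com/rhgkstjf/python | programmers/level2/배달/code.py | solution
-- ===== SOURCE A (Python) =====
-- import heapq
--
-- def solution(N, road, K):
--     answer = 0
--
--     dist = [999999]*(N+1)
--     PriorityQ = []
--     heapq.heappush(PriorityQ, (1,0))
--     dist[1] = 0
--
--     while PriorityQ:
--         cnode, c_weight = heapq.heappop(PriorityQ)
--         for start, end, weight in road:
--             cost_evl = c_weight + weight
--             if start == cnode and cost_evl < dist[end]:
--                 dist[end] = cost_evl
--                 heapq.heappush(PriorityQ, (end, cost_evl))
--             elif end == cnode and cost_evl < dist[start]: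
--                 dist[start] = cost_evl
--                 heapq.heappush(PriorityQ, (start, cost_evl))
--
--     answer = len([i for i in dist if i <= K])
--
--
--
--     return answer
-- ===== SOURCE B (Python) =====
-- import heapq
--
-- def solution(N, road, K):
--     # Faster: an adjacency index built once, so each pop relaxes only the
--     # popped node's incident edges instead of rescanning the whole road list.
--     adj = {}
--     for s, e, w in road:
--         adj.setdefault(s, []).append((e, w))
--         adj.setdefault(e, []).append((s, w))
--     dist = [999999] * (N + 1)
--     dist[1] = 0
--     pq = [(1, 0)]
--     while pq:
--         node, d = heapq.heappop(pq)
--         for nb, w in adj.get(node, []):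
--             nd = d + w
--             if nd < dist[nb]:
--                 dist[nb] = nd
--                 heapq.heappush(pq, (nb, nd))
--     return sum(1 for x in dist if x <= K)
-- ===== Notes on version B (the rewrite author's own statement) =====
-- stated objective: faster
-- what changed: B builds an adjacency-list index of the road edges once and, on each heap pop, relaxes only the popped node's incident edges, instead of A's rescan of the entire road list on every pop; the count is a single accumulator pass.
-- outside the precondition, e.g. on solution(5, [(1, 2, 500000), (2, 3, 600000), (3, 100, 1)], 5): A returns 1, B returns 1; on solution(5, [(1, 2, 500000), (2, 3, 600000), (3, 4, -1)], 5): A returns 1, B returns 1; on solution(2, [(100, 100, 1)], 5): A returns 1, B returns 1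
import Mathlib
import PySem

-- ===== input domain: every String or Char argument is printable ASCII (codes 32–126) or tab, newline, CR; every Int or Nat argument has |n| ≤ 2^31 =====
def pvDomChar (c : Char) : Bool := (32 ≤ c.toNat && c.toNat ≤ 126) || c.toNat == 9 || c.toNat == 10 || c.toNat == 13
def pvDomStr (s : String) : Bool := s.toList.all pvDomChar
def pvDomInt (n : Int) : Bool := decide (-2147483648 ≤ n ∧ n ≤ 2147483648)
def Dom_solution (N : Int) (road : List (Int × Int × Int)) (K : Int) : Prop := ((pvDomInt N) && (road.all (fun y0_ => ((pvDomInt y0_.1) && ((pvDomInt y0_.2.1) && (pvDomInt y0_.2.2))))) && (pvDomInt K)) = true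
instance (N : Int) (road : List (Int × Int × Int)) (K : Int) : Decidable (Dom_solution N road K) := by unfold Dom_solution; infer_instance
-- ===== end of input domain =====

-- B builds an adjacency index of the road list once and relaxes only the popped node's
-- incident edges, instead of A's rescan of the whole road list on every heap pop
-- (objective: faster); return values are identical, neither program mutates its arguments.
-- Shared between the ports: pvIdx, Python's list-index normalisation (exact for
-- -(len) ≤ i < len, the range Pre_ admits), and pvFuel, a termination guard only
-- (both loops stop when the queue empties).

def pvIdx (e : Int) (len : Nat) : Nat := (if e < 0 then e + (len : Int) else e).toNat

def pvFuel (N : Int) (road : List (Int × Int × Int)) : Nat := (N.toNat + road.length + 2) * 1000000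

-- ===== PORT A =====
-- heapq's pop of the least (node, cost) tuple: first lexicographic minimum, removed.
def pvLexLt (a b : Int × Int) : Bool := a.1 < b.1 || (a.1 == b.1 && a.2 < b.2)

def pvHeapPop (pq : List (Int × Int)) : Option ((Int × Int) × List (Int × Int)) :=
  match pq with
  | [] => none
  | x :: xs =>
      let m := xs.foldl (fun a b => if pvLexLt b a then b else a) x
      some (m, (x :: xs).erase m)

-- dist[e] read/write with Python's wraparound (reads off the list default to 999999;
-- under Pre_ every index A touches is in range, where this is exact).
def pvGet (dist : List Int) (e : Int) : Int := dist.getD (pvIdx e dist.length) 999999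

def pvSet (dist : List Int) (e : Int) (v : Int) : List Int := dist.set (pvIdx e dist.length) v

def solAStep (cnode cw : Int) (st : List Int × List (Int × Int)) (t : Int × Int × Int) :
    List Int × List (Int × Int) :=
  let cost := cw + t.2.2
  if t.1 = cnode ∧ cost < pvGet st.1 t.2.1 then
    (pvSet st.1 t.2.1 cost, st.2 ++ [(t.2.1, cost)])
  else if t.2.1 = cnode ∧ cost < pvGet st.1 t.1 then
    (pvSet st.1 t.1 cost, st.2 ++ [(t.1, cost)])
  else st

def solALoop (road : List (Int × Int × Int)) : Nat → List Int → List (Int × Int) → List Int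
  | 0, dist, _ => dist
  | fuel + 1, dist, pq =>
    match pvHeapPop pq with
    | none => dist
    | some ((cnode, cw), pq') =>
        let st := road.foldl (solAStep cnode cw) (dist, pq')
        solALoop road fuel st.1 st.2

def solution (N : Int) (road : List (Int × Int × Int)) (K : Int) : Int :=
  let dist0 := List.replicate (N + 1).toNat 999999
  let dist1 := pvSet dist0 1 0
  let dist := solALoop road (pvFuel N road) dist1 [(1, 0)]
  ((dist.filter (fun i => i ≤ K)).length : Int)

-- ===== PORT B =====
-- adj: dict from node to its incident (neighbour, weight) list, built in one pass.
def mkAdj (road : List (Int × Int × Int)) : PySem.Dict Int (List (Int × Int)) :=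
  road.foldl
    (fun d t =>
      (d.modify t.1 [] (· ++ [(t.2.1, t.2.2)])).modify t.2.1 [] (· ++ [(t.1, t.2.2)]))
    PySem.Dict.empty

-- dist[e] read/write, same wraparound convention as Python's list indexing.
def readD (d : List Int) (e : Int) : Int := (d.drop (pvIdx e d.length)).headD 999999

def writeD (d : List Int) (e v : Int) : List Int :=
  if pvIdx e d.length < d.length then
    d.take (pvIdx e d.length) ++ v :: d.drop (pvIdx e d.length + 1)
  else d

def relaxB (cw : Int) (st : List Int × List (Int × Int)) (p : Int × Int) :
    List Int × List (Int × Int) :=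
  let nd := cw + p.2
  if nd < readD st.1 p.1 then (writeD st.1 p.1 nd, st.2 ++ [(p.1, nd)]) else st

def solBLoop (adj : PySem.Dict Int (List (Int × Int))) :
    Nat → List Int → List (Int × Int) → List Int
  | 0, dist, _ => dist
  | fuel + 1, dist, pq =>
    match PySem.List.min2? pq (fun p => p.1) (fun p => p.2) with
    | none => dist
    | some m =>
        let st := (adj.getD m.1 []).foldl (relaxB m.2) (dist, pq.erase m)
        solBLoop adj fuel st.1 st.2

def solution_alt (N : Int) (road : List (Int × Int × Int)) (K : Int) : Int :=
  let adj := mkAdj road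
  let dist := solBLoop adj (pvFuel N road)
    (writeD (List.replicate (N + 1).toNat 999999) 1 0) [(1, 0)]
  dist.foldl (fun acc x => if x ≤ K then acc + 1 else acc) 0

-- ===== PRECONDITION & SPEC =====
-- pvReach road: the nodes of the INPUT graph connected to node 1 through edges of weight
-- < 999999 (a property of the input, computed as the usual closure; it does not run
-- either program). It over-approximates the nodes A's loop can ever pop.
def pvReachStep (road : List (Int × Int × Int)) (s : List Int) : List Int :=
  road.foldl
    (fun s t => if t.2.2 < 999999 ∧ (t.1 ∈ s ∨ t.2.1 ∈ s) then s ++ [t.1, t.2.1] else s) s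

def pvReach (road : List (Int × Int × Int)) : List Int := (pvReachStep road)^[road.length] [1]

-- Pre_ excludes N ≤ 0 (A's dist[1] = 0 raises IndexError), edges incident to a node
-- connected to 1 whose endpoints leave Python's index range [-(N+1), N] (A raises
-- IndexError when it touches them) or whose weight is negative (A loops forever on the
-- resulting negative cycle), and out-of-range self-loops; connectivity over-approximates
-- "touched", so Pre_ also drops a few inputs whose bad edge is never actually reached,
-- on which A returns and B returns the same value (see the cited examples).
def Pre_solution (N : Int) (road : List (Int × Int × Int)) (K : Int) : Prop :=
  1 ≤ N ∧
  (∀ t ∈ road, t.1 = t.2.1 → -(N + 1) ≤ t.1 ∧ t.1 ≤ N) ∧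
  (∀ t ∈ road, (t.1 ∈ pvReach road ∨ t.2.1 ∈ pvReach road) →
    (-(N + 1) ≤ t.1 ∧ t.1 ≤ N) ∧ (-(N + 1) ≤ t.2.1 ∧ t.2.1 ≤ N) ∧ 0 ≤ t.2.2)
instance (N : Int) (road : List (Int × Int × Int)) (K : Int) : Decidable (Pre_solution N road K) := by
  unfold Pre_solution; infer_instance

def pvWitness_solution : Int × (List (Int × Int × Int)) × Int := (2, [(1, 2, 1)], 2)

def Spec_solution (N : Int) (road : List (Int × Int × Int)) (K : Int) (out : Int) : Prop := out = solution_alt N road K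
instance (N : Int) (road : List (Int × Int × Int)) (K : Int) (out : Int) : Decidable (Spec_solution N road K out) := by unfold Spec_solution; infer_instance

-- ===== CLAIM (what is proved, stated in full; the proofs are below) =====
def Claim_equal_solution : Prop := ∀ (N : Int) (road : List (Int × Int × Int)) (K : Int), Dom_solution N road K → Pre_solution N road K → Spec_solution N road K (solution N road K)

-- ===== LEMMAS AND PROOFS =====

-- B's reads/writes agree with A's (same Python list semantics, different shape).
theorem readD_eq (d : List Int) (e : Int) : readD d e = pvGet d e := by
  simp [readD, pvGet, List.getD_eq_getElem?_getD, List.head?_drop, List.headD_eq_head?_getD]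

theorem writeD_eq (d : List Int) (e v : Int) : writeD d e v = pvSet d e v := by
  unfold writeD pvSet
  rw [List.set_eq_take_append_cons_drop]

theorem relaxB_eq (cw : Int) (st : List Int × List (Int × Int)) (p : Int × Int) :
    relaxB cw st p =
      if cw + p.2 < pvGet st.1 p.1 then (pvSet st.1 p.1 (cw + p.2), st.2 ++ [(p.1, cw + p.2)])
      else st := by
  simp [relaxB, readD_eq, writeD_eq]

-- B's pop (first lexicographic minimum, then erase) is A's pvHeapPop.
theorem min2?_foldl (xs : List (Int × Int)) :
    ∀ x : Int × Int,
      PySem.List.min2? (x :: xs) (fun p => p.1) (fun p => p.2) =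
        some (xs.foldl (fun a b => if pvLexLt b a then b else a) x) := by
  induction xs with
  | nil => intro x; rfl
  | cons y ys ih =>
    intro x
    have step :
        PySem.List.min2? (x :: y :: ys) (fun p => p.1) (fun p => p.2) =
          PySem.List.min2? ((if pvLexLt y x then y else x) :: ys) (fun p => p.1) (fun p => p.2) := by
      simp only [PySem.List.min2?, List.foldl_cons]
      congr 1
      have : (decide (y.1 < x.1) || !decide (x.1 < y.1) && decide (y.2 < x.2)) = pvLexLt y x := by
        simp only [pvLexLt]
        rcases lt_trichotomy y.1 x.1 with h | h | h <;>
          simp [h, not_lt_of_gt, beq_iff_eq] <;> omega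
      rw [this]; split <;> rfl
    rw [step, ih, List.foldl_cons]

-- the per-node entry list B's adjacency dict stores for key c, as a function of road
def pvEnt (c : Int) (t : Int × Int × Int) : List (Int × Int) :=
  (if t.1 = c then [(t.2.1, t.2.2)] else []) ++ (if t.2.1 = c then [(t.1, t.2.2)] else [])

theorem mkAdj_getD_gen (road : List (Int × Int × Int)) (c : Int) :
    ∀ d : PySem.Dict Int (List (Int × Int)),
      (road.foldl
        (fun d t =>
          (d.modify t.1 [] (· ++ [(t.2.1, t.2.2)])).modify t.2.1 [] (· ++ [(t.1, t.2.2)]))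
        d).getD c [] = d.getD c [] ++ road.flatMap (pvEnt c) := by
  induction road with
  | nil => simp
  | cons t rest ih =>
    intro d
    simp only [List.foldl_cons, List.flatMap_cons, ih]
    unfold pvEnt
    by_cases h1 : c = t.2.1 <;> by_cases h2 : c = t.1 <;>
      simp [PySem.Dict.getD_modify, h1, h2, eq_comm] <;> simp_all [eq_comm]

theorem mkAdj_getD (road : List (Int × Int × Int)) (c : Int) :
    (mkAdj road).getD c [] = road.flatMap (pvEnt c) := by
  rw [mkAdj, mkAdj_getD_gen]; simp

theorem pvSet_length (dist : List Int) (e v : Int) : (pvSet dist e v).length = dist.length := by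
  simp [pvSet]

theorem pvGet_pvSet_self (dist : List Int) (e v : Int)
    (h : pvIdx e dist.length < dist.length) : pvGet (pvSet dist e v) e = v := by
  simp [pvGet, pvSet, List.getD_eq_getElem?_getD, h]

theorem relax_head (c cw : Int) (t : Int × Int × Int) (dist : List Int) (pq : List (Int × Int))
    (hsl : t.1 = t.2.1 → pvIdx t.1 dist.length < dist.length) :
    (pvEnt c t).foldl (relaxB cw) (dist, pq) = solAStep c cw (dist, pq) t := by
  obtain ⟨s, e, w⟩ := t
  simp only [pvEnt, solAStep] at *
  by_cases hs : s = c <;> by_cases he : e = c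
  · -- s = c and e = c (a self-loop at c): B's two entries yield A's single relaxation
    subst hs; subst he
    by_cases hc : cw + w < pvGet dist e
    · simp [relaxB_eq, hc, pvGet_pvSet_self _ _ _ (hsl rfl)]
    · simp [relaxB_eq, hc]
  · subst hs
    simp only [if_neg he, List.append_nil]
    by_cases hc : cw + w < pvGet dist e
    · simp [relaxB_eq, hc]
    · simp [relaxB_eq, hc, he]
  · subst he
    simp only [if_neg hs, List.nil_append]
    by_cases hc : cw + w < pvGet dist s
    · simp [relaxB_eq, hc, hs]
    · simp [relaxB_eq, hc, hs]
  · simp [hs, he]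

theorem stepA_length (c cw : Int) (st : List Int × List (Int × Int)) (t : Int × Int × Int) :
    (solAStep c cw st t).1.length = st.1.length := by
  simp only [solAStep]
  split_ifs <;> simp [pvSet_length]

theorem relaxA_length (c cw : Int) (road : List (Int × Int × Int)) :
    ∀ st : List Int × List (Int × Int),
      (road.foldl (solAStep c cw) st).1.length = st.1.length := by
  induction road with
  | nil => intro st; rfl
  | cons t rest ih => intro st; rw [List.foldl_cons, ih, stepA_length]

theorem relax_eq (c cw : Int) (road : List (Int × Int × Int)) :
    ∀ (dist : List Int) (pq : List (Int × Int)),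
      (∀ t ∈ road, t.1 = t.2.1 → pvIdx t.1 dist.length < dist.length) →
      (road.flatMap (pvEnt c)).foldl (relaxB cw) (dist, pq) =
        road.foldl (solAStep c cw) (dist, pq) := by
  induction road with
  | nil => intro dist pq _; rfl
  | cons t rest ih =>
    intro dist pq h
    have ht := h t (by simp)
    rw [List.flatMap_cons, List.foldl_append, relax_head c cw t dist pq ht,
      List.foldl_cons]
    have hlen : (solAStep c cw (dist, pq) t).1.length = dist.length := stepA_length c cw (dist, pq) t
    have h' : ∀ t' ∈ rest, t'.1 = t'.2.1 →
        pvIdx t'.1 (solAStep c cw (dist, pq) t).1.length < (solAStep c cw (dist, pq) t).1.length := by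
      rw [hlen]; exact fun t' ht' => h t' (List.mem_cons_of_mem _ ht')
    simpa using ih (solAStep c cw (dist, pq) t).1 (solAStep c cw (dist, pq) t).2 h'

theorem loop_eq (road : List (Int × Int × Int)) (L : Nat)
    (hroad : ∀ t ∈ road, t.1 = t.2.1 → pvIdx t.1 L < L) :
    ∀ (fuel : Nat) (dist : List Int) (pq : List (Int × Int)), dist.length = L →
      solBLoop (mkAdj road) fuel dist pq = solALoop road fuel dist pq := by
  intro fuel
  induction fuel with
  | zero => intro dist pq _; rfl
  | succ fuel ih =>
    intro dist pq hlen
    rw [solBLoop, solALoop]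
    cases pq with
    | nil => rfl
    | cons x xs =>
      rw [min2?_foldl xs x]
      simp only [pvHeapPop]
      rw [mkAdj_getD, relax_eq _ _ road dist _ (by simpa [hlen] using hroad)]
      exact ih _ _ (by rw [relaxA_length]; exact hlen)

-- ===== VERDICT (by name: the statement is the Claim_ definition above) =====
theorem solution_spec : Claim_equal_solution := by
  intro N road K _ hpre
  obtain ⟨hN, hsl, _⟩ := hpre
  unfold Spec_solution solution solution_alt
  simp only []
  have hb : ∀ t ∈ road, t.1 = t.2.1 → pvIdx t.1 (N + 1).toNat < (N + 1).toNat := by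
    intro t ht heq
    obtain ⟨a1, a2⟩ := hsl t ht heq
    unfold pvIdx
    split_ifs <;> omega
  have hlen1 : (writeD (List.replicate (N + 1).toNat 999999) 1 0).length = (N + 1).toNat := by
    rw [writeD_eq, pvSet_length, List.length_replicate]
  rw [writeD_eq, loop_eq road (N + 1).toNat hb (pvFuel N road) _ [(1, 0)] (by simpa [writeD_eq] using hlen1)]
  rw [PySem.List.foldl_ite_add_one]
  simp [List.countP_eq_length_filter]
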